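-- pv_equiv track=rewrite | github.com/chendi23/abnormal_detection_comp | RS/models/recommend_metrics.py | get_hit_user_ratio
-- ===== SOURCE A (Python) =====
-- def get_hit_user_ratio(eval_set, offline_user_topn_items_dict):
--     hit_num = 0
--     total_user = offline_user_topn_items_dict.keys()
--     total_user_num = len(total_user)
--     test_user_item_dict = {}
--     for (user_id, item_id, rate) in eval_set:
--         test_user_item_dict[user_id + "|||" + item_id] = 1
--     for uid in total_user:
--         recommend_list = [iid for (iid, score) in offline_user_topn_items_dict[uid]]
--         for iid in recommend_list:
--             lookup_key = uid + "|||" + iid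
--             if lookup_key in test_user_item_dict:
--                 hit_num += 1
--                 break
--
--     hit_user_str = "hit_user@10：" + str(hit_num) + "   ,total_user@10：" + str(total_user_num)
--     return hit_user_str
-- ===== SOURCE B (Python) =====
-- def get_hit_user_ratio(eval_set, offline_user_topn_items_dict):
--     # Inverted index: candidate key -> list of users that recommend it.
--     owners = {}
--     for uid, items in offline_user_topn_items_dict.items():
--         for iid, score in items:
--             owners.setdefault(uid + "|||" + iid, []).append(uid)
--     # One scan over the test set collects the distinct hit users.
--     hit_users = set()
--     for user_id, item_id, rate in eval_set:
--         hit_users.update(owners.get(user_id + "|||" + item_id, []))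
--     return ("hit_user@10：" + str(len(hit_users))
--             + "   ,total_user@10：" + str(len(offline_user_topn_items_dict)))
-- ===== Notes on version B (the rewrite author's own statement) =====
-- stated objective: alternative
-- what changed: Inverts the data flow: instead of scanning each user's recommendations against a test-key dict with an early break, B builds an inverted index from candidate key to its recommending users and makes a single pass over the test set collecting the distinct hit users into a set, counting them at the end.
import Mathlib
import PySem

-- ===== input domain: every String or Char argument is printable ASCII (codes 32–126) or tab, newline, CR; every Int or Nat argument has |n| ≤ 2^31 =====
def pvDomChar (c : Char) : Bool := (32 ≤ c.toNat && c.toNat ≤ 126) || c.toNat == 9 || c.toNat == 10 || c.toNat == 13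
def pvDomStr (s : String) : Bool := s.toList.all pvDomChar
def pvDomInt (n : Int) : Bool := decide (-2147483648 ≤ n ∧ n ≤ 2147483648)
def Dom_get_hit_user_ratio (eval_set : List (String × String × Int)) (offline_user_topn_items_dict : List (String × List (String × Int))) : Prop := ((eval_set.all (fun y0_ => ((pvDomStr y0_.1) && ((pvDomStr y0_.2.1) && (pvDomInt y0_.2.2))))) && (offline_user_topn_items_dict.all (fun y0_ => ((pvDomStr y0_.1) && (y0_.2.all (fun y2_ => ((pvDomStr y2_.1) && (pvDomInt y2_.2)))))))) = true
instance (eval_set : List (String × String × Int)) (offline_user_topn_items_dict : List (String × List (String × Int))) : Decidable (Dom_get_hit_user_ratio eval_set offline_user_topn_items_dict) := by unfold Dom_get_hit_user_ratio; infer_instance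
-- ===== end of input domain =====

-- B inverts A's data flow ('alternative'): it builds an inverted index from candidate key to the
-- users recommending it and scans the test set once collecting distinct hit users; same cost.


-- ===== PORT A =====
-- inner 'for iid in recommend_list: … break' loop of A
def pvHitLoop (test : PySem.Dict String Int) (uid : String) : List String → Int → Int
  | [], hit => hit
  | iid :: rest, hit =>
    if test.contains (uid ++ "|||" ++ iid) then hit + 1 else pvHitLoop test uid rest hit

def get_hit_user_ratio (eval_set : List (String × String × Int)) (offline_user_topn_items_dict : List (String × List (String × Int))) : String :=
  let od := PySem.Dict.ofList offline_user_topn_items_dict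
  let total_user := PySem.Dict.keys od
  let total_user_num := total_user.length
  let test := eval_set.foldl
    (fun t p => t.insert (p.1 ++ "|||" ++ p.2.1) (1 : Int)) (PySem.Dict.empty)
  let hit_num := total_user.foldl
    (fun hit uid =>
      let recommend_list := (od.getD uid []).map (·.1)
      pvHitLoop test uid recommend_list hit) (0 : Int)
  "hit_user@10：" ++ PySem.Int.toStr hit_num ++ "   ,total_user@10：" ++ PySem.Int.toStr (total_user_num : Int)

-- ===== PORT B =====
def get_hit_user_ratio_alt (eval_set : List (String × String × Int)) (offline_user_topn_items_dict : List (String × List (String × Int))) : String :=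
  let od := PySem.Dict.ofList offline_user_topn_items_dict
  -- owners: inverted index candidate key -> list of users recommending it
  -- (setdefault(k, []).append(uid) = modify k [] (· ++ [uid]))
  let owners : PySem.Dict String (List String) :=
    od.items.foldl (fun d ui =>
      ui.2.foldl (fun d q => d.modify (ui.1 ++ "|||" ++ q.1) [] (· ++ [ui.1])) d)
      PySem.Dict.empty
  -- hit_users: one scan over the test set, union of the owner lists
  let hit_users : PySem.Set String :=
    eval_set.foldl (fun s e => PySem.Set.update s (owners.getD (e.1 ++ "|||" ++ e.2.1) []))
      PySem.Set.empty
  "hit_user@10：" ++ PySem.Int.toStr ((hit_users.length : Nat) : Int)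
    ++ "   ,total_user@10：" ++ PySem.Int.toStr ((PySem.Dict.size od : Nat) : Int)

-- ===== PRECONDITION & SPEC =====
def Spec_get_hit_user_ratio (eval_set : List (String × String × Int)) (offline_user_topn_items_dict : List (String × List (String × Int))) (out : String) : Prop := out = get_hit_user_ratio_alt eval_set offline_user_topn_items_dict
instance (eval_set : List (String × String × Int)) (offline_user_topn_items_dict : List (String × List (String × Int))) (out : String) : Decidable (Spec_get_hit_user_ratio eval_set offline_user_topn_items_dict out) := by unfold Spec_get_hit_user_ratio; infer_instance

-- ===== CLAIM (what is proved, stated in full; the proofs are below) =====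
def Claim_equal_get_hit_user_ratio : Prop := ∀ (eval_set : List (String × String × Int)) (offline_user_topn_items_dict : List (String × List (String × Int))), Dom_get_hit_user_ratio eval_set offline_user_topn_items_dict → Spec_get_hit_user_ratio eval_set offline_user_topn_items_dict (get_hit_user_ratio eval_set offline_user_topn_items_dict)

-- ===== LEMMAS AND PROOFS =====

-- the dict A builds over eval_set contains exactly the concatenated test keys
theorem pvTest_contains (eval_set : List (String × String × Int)) (k : String) :
    (eval_set.foldl (fun t p => t.insert (p.1 ++ "|||" ++ p.2.1) (1 : Int))
        (PySem.Dict.empty)).contains k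
      = (k ∈ eval_set.map (fun p => p.1 ++ "|||" ++ p.2.1) : Bool) := by
  have hkeys := PySem.Dict.keys_foldl_insert_key eval_set
    (fun p : String × String × Int => p.1 ++ "|||" ++ p.2.1)
    (fun _ _ => (1 : Int)) (PySem.Dict.empty)
  rw [PySem.Dict.contains_eq_decide_mem_keys, hkeys]
  simp [PySem.Dict.keys_empty, PySem.Set.update_nil_left, PySem.Set.mem_ofList]

-- A's break-loop adds 1 iff some candidate key is in the test dict
theorem pvHitLoop_eq (test : PySem.Dict String Int) (uid : String) (iids : List String) (hit : Int) :
    pvHitLoop test uid iids hit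
      = if iids.any (fun iid => test.contains (uid ++ "|||" ++ iid)) then hit + 1 else hit := by
  induction iids with
  | nil => simp [pvHitLoop]
  | cons a rest ih =>
    simp only [pvHitLoop, List.any_cons]
    by_cases h : test.contains (uid ++ "|||" ++ a) <;> simp [h, ih]

-- the flattened (candidate key, user) pair list of the offline dict
def pvPairs (items : List (String × List (String × Int))) : List (String × String) :=
  items.flatMap (fun ui => ui.2.map (fun q => (ui.1 ++ "|||" ++ q.1, ui.1)))

-- B's nested owners loop, characterised per key
theorem pvOwners_getD (items : List (String × List (String × Int))) (k : String) :
    (items.foldl (fun d ui =>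
        ui.2.foldl (fun d q => d.modify (ui.1 ++ "|||" ++ q.1) [] (· ++ [ui.1])) d)
        (PySem.Dict.empty)).getD k []
      = ((pvPairs items).filter (fun p => p.1 == k)).map (·.2) := by
  have hflat : ∀ (d : PySem.Dict String (List String)),
      items.foldl (fun d ui =>
          ui.2.foldl (fun d q => d.modify (ui.1 ++ "|||" ++ q.1) [] (· ++ [ui.1])) d) d
        = (pvPairs items).foldl (fun d p => d.modify p.1 [] (· ++ [p.2])) d := by
    induction items with
    | nil => intro d; simp [pvPairs]
    | cons ui rest ih =>
      intro d
      simp only [List.foldl_cons, pvPairs, List.flatMap_cons, List.foldl_append, ih]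
      congr 1
      rw [List.foldl_map]
  rw [hflat, PySem.Dict.getD_foldl_modify_append]
  simp [PySem.Dict.getD_empty]

-- membership in B's hit_users accumulator
theorem pvHitUsers_mem (eval_set : List (String × String × Int))
    (F : String × String × Int → List String) (s : PySem.Set String) (x : String) :
    x ∈ eval_set.foldl (fun s e => PySem.Set.update s (F e)) s
      ↔ x ∈ s ∨ ∃ e ∈ eval_set, x ∈ F e := by
  induction eval_set generalizing s with
  | nil => simp
  | cons e rest ih =>
    simp only [List.foldl_cons, ih, PySem.Set.mem_update, List.mem_cons]
    constructor
    · rintro (⟨h | h⟩ | ⟨e', he', hx⟩)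
      · exact Or.inl h
      · exact Or.inr ⟨e, Or.inl rfl, h⟩
      · exact Or.inr ⟨e', Or.inr he', hx⟩
    · rintro (h | ⟨e', (rfl | he'), hx⟩)
      · exact Or.inl (Or.inl h)
      · exact Or.inl (Or.inr hx)
      · exact Or.inr ⟨e', he', hx⟩

-- B's accumulator stays duplicate-free
theorem pvHitUsers_nodup (eval_set : List (String × String × Int))
    (F : String × String × Int → List String) (s : PySem.Set String) (hs : s.Nodup) :
    (eval_set.foldl (fun s e => PySem.Set.update s (F e)) s).Nodup := by
  induction eval_set generalizing s with
  | nil => exact hs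
  | cons e rest ih => exact ih _ (PySem.Set.nodup_update _ _ hs)

-- ===== VERDICT (by name: the statement is the Claim_ definition above) =====
theorem get_hit_user_ratio_spec : Claim_equal_get_hit_user_ratio := by
  intro eval_set d _
  unfold Spec_get_hit_user_ratio get_hit_user_ratio get_hit_user_ratio_alt
  set od := PySem.Dict.ofList d with hod
  have hnd : od.keys.Nodup := PySem.Dict.nodup_keys_ofList d
  -- the Bool predicate 'user uid has a hit' used on the A side
  set p : String → Bool := fun uid =>
    ((od.getD uid []).map (·.1)).any
      (fun iid => (uid ++ "|||" ++ iid) ∈ eval_set.map (fun p => p.1 ++ "|||" ++ p.2.1)) with hp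
  -- A's counter is countP p over the keys
  have hA :
      od.keys.foldl (fun hit uid =>
          pvHitLoop (eval_set.foldl (fun t p => t.insert (p.1 ++ "|||" ++ p.2.1) (1 : Int))
              (PySem.Dict.empty)) uid ((od.getD uid []).map (·.1)) hit) (0 : Int)
        = ((od.keys.countP p : Nat) : Int) := by
    simp only [pvHitLoop_eq, pvTest_contains]
    rw [PySem.List.foldl_if_add_one (p := p), zero_add]
  -- B's hit_users is a nodup list with the same membership as od.keys.filter p
  set owners := od.items.foldl (fun d ui =>
      ui.2.foldl (fun d q => d.modify (ui.1 ++ "|||" ++ q.1) [] (· ++ [ui.1])) d)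
      (PySem.Dict.empty) with howners
  set hit_users := eval_set.foldl
      (fun s e => PySem.Set.update s (owners.getD (e.1 ++ "|||" ++ e.2.1) []))
      PySem.Set.empty with hhu
  have hmem : ∀ x, x ∈ hit_users ↔ x ∈ od.keys.filter p := by
    intro x
    rw [hhu, pvHitUsers_mem eval_set (fun e => owners.getD (e.1 ++ "|||" ++ e.2.1) [])]
    simp only [PySem.Set.empty, List.not_mem_nil, false_or, List.mem_filter]
    constructor
    · rintro ⟨e, he, hx⟩
      rw [howners, pvOwners_getD] at hx
      obtain ⟨pr, hpr, rfl⟩ := List.mem_map.mp hx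
      have hprf := List.mem_filter.mp hpr
      obtain ⟨ui, hui, hq⟩ := List.mem_flatMap.mp hprf.1
      obtain ⟨q, hqmem, rfl⟩ := List.mem_map.mp hq
      have hkey : ui.1 ∈ od.keys := PySem.Dict.mem_keys_of_mem_items _ hui
      have hval : od.getD ui.1 [] = ui.2 := by
        rcases ui with ⟨u, its⟩
        exact PySem.Dict.getD_of_mem_items _ hui hnd []
      refine ⟨hkey, ?_⟩
      rw [hp]
      simp only [List.any_eq_true, List.mem_map, decide_eq_true_eq]
      refine ⟨q.1, ⟨q, by rw [hval]; exact hqmem, rfl⟩, ?_⟩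
      have : ui.1 ++ "|||" ++ q.1 = e.1 ++ "|||" ++ e.2.1 := by
        simpa using hprf.2
      rw [this]
      exact ⟨e, he, rfl⟩
    · rintro ⟨hkx, hpx⟩
      rw [hp] at hpx
      simp only [List.any_eq_true, List.mem_map, decide_eq_true_eq] at hpx
      obtain ⟨iid, ⟨q, hq, rfl⟩, ⟨e, he, hke⟩⟩ := hpx
      refine ⟨e, he, ?_⟩
      rw [howners, pvOwners_getD]
      apply List.mem_map.mpr
      refine ⟨(x ++ "|||" ++ q.1, x), List.mem_filter.mpr ⟨?_, by simpa using hke.symm⟩, rfl⟩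
      apply List.mem_flatMap.mpr
      have hitems := PySem.Dict.items_eq_map_keys od hnd ([] : List (String × Int))
      refine ⟨(x, od.getD x []), ?_, ?_⟩
      · rw [hitems]; exact List.mem_map.mpr ⟨x, hkx, rfl⟩
      · exact List.mem_map.mpr ⟨q, hq, rfl⟩
  have hndhu : hit_users.Nodup := pvHitUsers_nodup _ _ _ (by simp [PySem.Set.empty])
  have hperm : hit_users.Perm (od.keys.filter p) :=
    (List.perm_ext_iff_of_nodup hndhu (hnd.filter p)).mpr hmem
  have hlen : hit_users.length = od.keys.countP p := by
    rw [hperm.length_eq, List.countP_eq_length_filter]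
  have hsize : PySem.Dict.size od = od.keys.length := by
    simp [PySem.Dict.size, PySem.Dict.keys]
  simp only [hA, hsize]
  rw [← howners, ← hhu, hlen]
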